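-- pv_equiv track=rewrite | github.com/AlexanderVNikitin/kernel-language-entropy | kle/vis_utils.py | kernels_from_results
-- ===== SOURCE A (Python) =====
-- import collections
--
-- def kernels_from_results(results):
--     """
--     returns a dictionary of aggregated kernel names:
--     base_name: [raw_name_hp1=v1_...,]
--     """
--     kernels = collections.defaultdict(list)
--     for key in results["uncertainty"].keys():
--         #if key.startswith("heat") and not "UNANSWERABLE" in key:
--         #    kernels["Heat"].append(key)
--         #elif key.startswith("matern") and not "UNANSWERABLE" in key:
--         #    kernels["Matern"].append(key)
--         if key.startswith("weighted_heat_") and not "UNANSWERABLE" in key: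
--             kernels["Weighted Heat"].append(key)
--         elif key.startswith("weighted_matern_") and not "UNANSWERABLE" in key:
--             kernels["Weighted Matern"].append(key)
--         elif key.startswith("weighted_matern_") and not "UNANSWERABLE" in key:
--             kernels["Weighted Matern"].append(key)
--         elif key.startswith("semantic_kernel_heat") and not "UNANSWERABLE" in key:
--             kernels["Semantic Heat"].append(key)
--         elif key.startswith("semantic_kernel_matern") and not "UNANSWERABLE" in key:
--             kernels["Semantic Matern"].append(key)
--         elif key.startswith("semantic_kernel_prod") and not "UNANSWERABLE" in key:
--             kernels["Semantic Prod"].append(key)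
--         elif key.startswith("semantic_kernel_sum") and not "UNANSWERABLE" in key:
--             kernels["Semantic Sum"].append(key)
--         elif (key.startswith("full_klu_")) and  not "UNANSWERABLE" in key:
--             kernels["Full KLE"].append(key)
--         elif key.startswith("deberta") and not "UNANSWERABLE" in key:
--             kernels["Deberta Weighted"].append(key)
--         elif key.startswith("weighted_deberta_") and not "UNANSWERABLE" in key:
--             kernels["Deberta Weighted C"].append(key)
--
--         if "eigv" in key:
--             kernels["eigv"].append(key)
--         elif "u_deg" in key:
--             kernels["u_deg"].append(key)
--
--         if ("kernel" in key or ("weighted" in key and not "eigv" in key and not "u_deg" in key) or "deberta" in key or "matern" in key or "heat" in key) and not "UNANSWERABLE" in key: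
--             kernels["All KLEs"].append(key)
--     return kernels
-- ===== SOURCE B (Python) =====
-- import collections
--
-- # Ordered (prefix, label) pairs in A's priority order (the duplicate
-- # weighted_matern_ branch of A is unreachable and carries no behaviour).
-- _PREFIX_TABLE = [
--     ("weighted_heat_", "Weighted Heat"),
--     ("weighted_matern_", "Weighted Matern"),
--     ("semantic_kernel_heat", "Semantic Heat"),
--     ("semantic_kernel_matern", "Semantic Matern"),
--     ("semantic_kernel_prod", "Semantic Prod"),
--     ("semantic_kernel_sum", "Semantic Sum"),
--     ("full_klu_", "Full KLE"),
--     ("deberta", "Deberta Weighted"),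
--     ("weighted_deberta_", "Deberta Weighted C"),
-- ]
--
--
-- def _labels(key):
--     """All category labels of one key, in the order A would emit them."""
--     labels = []
--     if "UNANSWERABLE" not in key:
--         for prefix, label in _PREFIX_TABLE:
--             if key.startswith(prefix):
--                 labels.append(label)
--                 break
--     for sub in ("eigv", "u_deg"):
--         if sub in key:
--             labels.append(sub)
--             break
--     if "UNANSWERABLE" not in key and (
--         any(s in key for s in ("kernel", "deberta", "matern", "heat"))
--         or ("weighted" in key and "eigv" not in key and "u_deg" not in key)
--     ):
--         labels.append("All KLEs")
--     return labels
--
--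
-- def kernels_from_results(results):
--     # Stage 1: flatten to a (label, key) event stream.
--     events = [(label, key)
--               for key in results["uncertainty"].keys()
--               for label in _labels(key)]
--     # Stage 2: group by label, first-appearance order.
--     order = dict.fromkeys(label for label, _ in events)
--     return {label: [k for l, k in events if l == label] for label in order}
-- ===== Notes on version B (the rewrite author's own statement) =====
-- stated objective: alternative
-- what changed: Instead of a single pass that mutates a defaultdict while classifying each key through A's if/elif ladders, B first flattens the keys into a (label, key) event stream via a pure per-key classifier, then builds the result by group-by: dedup of labels in first-appearance order, with each bucket a per-label filter over the event stream.
-- outside the precondition, e.g. on kernels_from_results({'other': {'weighted_heat_a': 1}}): A raises KeyError, B raises KeyError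
import Mathlib
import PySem

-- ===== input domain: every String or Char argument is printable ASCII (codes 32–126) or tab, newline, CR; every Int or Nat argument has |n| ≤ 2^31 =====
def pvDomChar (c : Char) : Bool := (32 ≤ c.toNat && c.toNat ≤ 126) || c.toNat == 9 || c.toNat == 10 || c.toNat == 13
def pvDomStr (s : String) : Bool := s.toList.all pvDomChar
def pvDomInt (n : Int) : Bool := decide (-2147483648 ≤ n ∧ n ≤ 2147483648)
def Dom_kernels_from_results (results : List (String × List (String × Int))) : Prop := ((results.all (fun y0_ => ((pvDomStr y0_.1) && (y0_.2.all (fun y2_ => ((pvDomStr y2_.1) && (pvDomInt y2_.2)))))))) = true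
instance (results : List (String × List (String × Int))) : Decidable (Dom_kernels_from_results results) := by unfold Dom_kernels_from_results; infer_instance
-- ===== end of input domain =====

-- B replaces A's single mutating-defaultdict pass by a staged group-by: a pure per-key
-- classifier flattens the keys into a (label, key) event stream, then first-appearance
-- dedup of labels and a per-label filter build the buckets; objective: alternative (same cost class).


-- ===== PORT A =====
-- kernels[lbl].append(key) on a defaultdict(list)
def pvDD (d : PySem.Dict String (List String)) (lbl key : String) : PySem.Dict String (List String) :=
  d.modify lbl [] (· ++ [key])

-- A's loop body, its three source sections step for step (including the duplicate
-- weighted_matern_ branch)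
def pvLadderA (d : PySem.Dict String (List String)) (key : String) : PySem.Dict String (List String) :=
  if PySem.Str.startswith key "weighted_heat_" && !(PySem.Str.isIn "UNANSWERABLE" key) then pvDD d "Weighted Heat" key
  else if PySem.Str.startswith key "weighted_matern_" && !(PySem.Str.isIn "UNANSWERABLE" key) then pvDD d "Weighted Matern" key
  else if PySem.Str.startswith key "weighted_matern_" && !(PySem.Str.isIn "UNANSWERABLE" key) then pvDD d "Weighted Matern" key
  else if PySem.Str.startswith key "semantic_kernel_heat" && !(PySem.Str.isIn "UNANSWERABLE" key) then pvDD d "Semantic Heat" key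
  else if PySem.Str.startswith key "semantic_kernel_matern" && !(PySem.Str.isIn "UNANSWERABLE" key) then pvDD d "Semantic Matern" key
  else if PySem.Str.startswith key "semantic_kernel_prod" && !(PySem.Str.isIn "UNANSWERABLE" key) then pvDD d "Semantic Prod" key
  else if PySem.Str.startswith key "semantic_kernel_sum" && !(PySem.Str.isIn "UNANSWERABLE" key) then pvDD d "Semantic Sum" key
  else if PySem.Str.startswith key "full_klu_" && !(PySem.Str.isIn "UNANSWERABLE" key) then pvDD d "Full KLE" key
  else if PySem.Str.startswith key "deberta" && !(PySem.Str.isIn "UNANSWERABLE" key) then pvDD d "Deberta Weighted" key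
  else if PySem.Str.startswith key "weighted_deberta_" && !(PySem.Str.isIn "UNANSWERABLE" key) then pvDD d "Deberta Weighted C" key
  else d

def pvEigvA (d : PySem.Dict String (List String)) (key : String) : PySem.Dict String (List String) :=
  if PySem.Str.isIn "eigv" key then pvDD d "eigv" key
  else if PySem.Str.isIn "u_deg" key then pvDD d "u_deg" key
  else d

def pvAllA (d : PySem.Dict String (List String)) (key : String) : PySem.Dict String (List String) :=
  if (PySem.Str.isIn "kernel" key
      || (PySem.Str.isIn "weighted" key && !(PySem.Str.isIn "eigv" key) && !(PySem.Str.isIn "u_deg" key))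
      || PySem.Str.isIn "deberta" key || PySem.Str.isIn "matern" key || PySem.Str.isIn "heat" key)
     && !(PySem.Str.isIn "UNANSWERABLE" key) then pvDD d "All KLEs" key
  else d

def pvStepA (d : PySem.Dict String (List String)) (key : String) : PySem.Dict String (List String) :=
  pvAllA (pvEigvA (pvLadderA d key) key) key

def kernels_from_results (results : List (String × List (String × Int))) : List (String × List String) :=
  match (PySem.Dict.ofList results).get? "uncertainty" with
  | none => []  -- Python raises KeyError here; excluded by Pre_
  | some unc => (((PySem.Dict.ofList unc).keys).foldl pvStepA PySem.Dict.empty).items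

-- ===== PORT B =====
def pvPrefixTable : List (String × String) :=
  [("weighted_heat_", "Weighted Heat"),
   ("weighted_matern_", "Weighted Matern"),
   ("semantic_kernel_heat", "Semantic Heat"),
   ("semantic_kernel_matern", "Semantic Matern"),
   ("semantic_kernel_prod", "Semantic Prod"),
   ("semantic_kernel_sum", "Semantic Sum"),
   ("full_klu_", "Full KLE"),
   ("deberta", "Deberta Weighted"),
   ("weighted_deberta_", "Deberta Weighted C")]

-- B's pure per-key classifier _labels: the three appended pieces of its labels list
def pvLabelsB (key : String) : List String :=
  (if !(PySem.Str.isIn "UNANSWERABLE" key) then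
     ((pvPrefixTable.find? (fun p => PySem.Str.startswith key p.1)).map (·.2)).toList
   else [])
  ++ ((["eigv", "u_deg"].find? (fun sub => PySem.Str.isIn sub key)).toList)
  ++ (if !(PySem.Str.isIn "UNANSWERABLE" key)
        && (["kernel", "deberta", "matern", "heat"].any (fun s => PySem.Str.isIn s key)
            || (PySem.Str.isIn "weighted" key && !(PySem.Str.isIn "eigv" key) && !(PySem.Str.isIn "u_deg" key)))
      then ["All KLEs"] else [])

def kernels_from_results_alt (results : List (String × List (String × Int))) : List (String × List String) :=
  match (PySem.Dict.ofList results).get? "uncertainty" with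
  | none => []  -- Python raises KeyError here; excluded by Pre_
  | some unc =>
    let events := ((PySem.Dict.ofList unc).keys).flatMap
      (fun key => (pvLabelsB key).map (fun l => (l, key)))
    (PySem.List.dedup (events.map (·.1))).map
      (fun l => (l, (events.filter (fun e => e.1 == l)).map (·.2)))

-- ===== PRECONDITION & SPEC =====
-- Pre_ excludes exactly the inputs without an "uncertainty" key, on which Python A raises KeyError.
def Pre_kernels_from_results (results : List (String × List (String × Int))) : Prop :=
  "uncertainty" ∈ results.map (·.1)
instance (results : List (String × List (String × Int))) : Decidable (Pre_kernels_from_results results) := by unfold Pre_kernels_from_results; infer_instance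

def pvWitness_kernels_from_results : (List (String × List (String × Int))) := [("uncertainty", [("weighted_heat_a", 1)])]

def Spec_kernels_from_results (results : List (String × List (String × Int))) (out : List (String × List String)) : Prop := out = kernels_from_results_alt results
instance (results : List (String × List (String × Int))) (out : List (String × List String)) : Decidable (Spec_kernels_from_results results out) := by unfold Spec_kernels_from_results; infer_instance

-- ===== CLAIM =====
def Claim_equal_kernels_from_results : Prop := ∀ (results : List (String × List (String × Int))), Dom_kernels_from_results results → Pre_kernels_from_results results → Spec_kernels_from_results results (kernels_from_results results)

-- ===== LEMMAS AND PROOFS =====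

-- each of A's three sections is the pvDD-fold of the corresponding piece of B's label list
lemma pvLadderA_eq (d : PySem.Dict String (List String)) (key : String) :
    pvLadderA d key =
      (if !(PySem.Str.isIn "UNANSWERABLE" key) then
         ((pvPrefixTable.find? (fun p => PySem.Str.startswith key p.1)).map (·.2)).toList
       else []).foldl (fun d l => pvDD d l key) d := by
  unfold pvLadderA
  simp only [pvPrefixTable, List.find?]
  cases hU : PySem.Str.isIn "UNANSWERABLE" key <;>
  cases h1 : PySem.Str.startswith key "weighted_heat_" <;>
  cases h2 : PySem.Str.startswith key "weighted_matern_" <;>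
  cases h3 : PySem.Str.startswith key "semantic_kernel_heat" <;>
  cases h4 : PySem.Str.startswith key "semantic_kernel_matern" <;>
  cases h5 : PySem.Str.startswith key "semantic_kernel_prod" <;>
  cases h6 : PySem.Str.startswith key "semantic_kernel_sum" <;>
  cases h7 : PySem.Str.startswith key "full_klu_" <;>
  cases h8 : PySem.Str.startswith key "deberta" <;>
  cases h9 : PySem.Str.startswith key "weighted_deberta_" <;>
  rfl

lemma pvEigvA_eq (d : PySem.Dict String (List String)) (key : String) :
    pvEigvA d key =
      ((["eigv", "u_deg"].find? (fun sub => PySem.Str.isIn sub key)).toList).foldl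
        (fun d l => pvDD d l key) d := by
  unfold pvEigvA
  simp only [List.find?]
  cases hE : PySem.Str.isIn "eigv" key <;>
  cases hG : PySem.Str.isIn "u_deg" key <;>
  rfl

lemma pv_allkle_bool (u k w e g db m h : Bool) :
    ((k || w && !e && !g || db || m || h) && !u)
      = (!u && (k || (db || (m || (h || false))) || w && !e && !g)) := by
  revert u k w e g db m h; decide

lemma pvAllA_eq (d : PySem.Dict String (List String)) (key : String) :
    pvAllA d key =
      (if !(PySem.Str.isIn "UNANSWERABLE" key)
          && (["kernel", "deberta", "matern", "heat"].any (fun s => PySem.Str.isIn s key)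
              || (PySem.Str.isIn "weighted" key && !(PySem.Str.isIn "eigv" key) && !(PySem.Str.isIn "u_deg" key)))
        then ["All KLEs"] else []).foldl (fun d l => pvDD d l key) d := by
  unfold pvAllA
  simp only [List.any]
  rw [pv_allkle_bool]
  have hgen : ∀ b : Bool, (if b then pvDD d "All KLEs" key else d)
      = List.foldl (fun d l => pvDD d l key) d (if b then ["All KLEs"] else []) := by
    intro b; cases b <;> rfl
  exact hgen _

-- A's whole loop body is the pvDD-fold of B's label list
lemma pvStepA_eq_foldl (d : PySem.Dict String (List String)) (key : String) :
    pvStepA d key = (pvLabelsB key).foldl (fun d l => pvDD d l key) d := by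
  unfold pvStepA pvLabelsB
  rw [pvLadderA_eq, pvEigvA_eq, pvAllA_eq, List.foldl_append, List.foldl_append]

-- the grouped form of an event-stream fold of list appends
lemma pv_group (events : List (String × String)) :
    (events.foldl (fun d p => d.modify p.1 [] (· ++ [p.2])) PySem.Dict.empty).items
      = (PySem.List.dedup (events.map (·.1))).map
          (fun l => (l, (events.filter (fun e => e.1 == l)).map (·.2))) := by
  have hk : (events.foldl (fun d p => d.modify p.1 [] (· ++ [p.2])) PySem.Dict.empty).keys
      = PySem.List.dedup (events.map (·.1)) := by
    rw [PySem.Dict.keys_foldl_modify_key events (·.1) [] (fun _ p => (· ++ [p.2])) PySem.Dict.empty,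
      PySem.List.dedup_eq_ofList]
    simp [PySem.Dict.keys, PySem.Dict.empty, PySem.Set.update_nil_left]
  have hnd : (events.foldl (fun d p => d.modify p.1 [] (· ++ [p.2])) PySem.Dict.empty).keys.Nodup := by
    rw [hk]; exact PySem.List.nodup_dedup _
  rw [PySem.Dict.items_eq_map_keys _ hnd [], hk]
  refine List.map_congr_left (fun l _ => ?_)
  rw [PySem.Dict.getD_foldl_modify_append events PySem.Dict.empty l]
  simp [PySem.Dict.getD_empty]

-- ===== VERDICT (by name: the statement is the Claim_ definition above) =====
theorem kernels_from_results_spec : Claim_equal_kernels_from_results := by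
  intro results _ _
  unfold Spec_kernels_from_results kernels_from_results kernels_from_results_alt
  cases h : (PySem.Dict.ofList results).get? "uncertainty" with
  | none => rfl
  | some unc =>
    simp only
    rw [← pv_group]
    rw [List.foldl_flatMap]
    refine congrArg PySem.Dict.items ?_
    apply PySem.List.foldl_congr_mem
    intro d key _
    rw [pvStepA_eq_foldl, List.foldl_map]; rfl
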